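-- pv_equiv track=rewrite | github.com/wyk18703232953/myResearch | codeComplex/data/filteredData/python/quadratic/python_quadratic_0538.py | solve_single_case
-- ===== SOURCE A (Python) =====
-- memo = {}
--
-- def max_splits(n):
--     if n == 0:
--         return 0
--     if n == 1:
--         return 1
--     if n in memo:
--         return memo[n]
--     result = 4 * max_splits(n - 1) + 1
--     memo[n] = result
--     return result
--
-- def solve_single_case(n, k):
--     min_splits = 1
--     path_count = 3
--
--     if n > 75:
--         return "YES", n - 1
--
--     square_size = n - 1
--     max_buffer = max_splits(square_size)
--
--     while min_splits + path_count <= k and square_size > 0: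
--         min_splits += path_count
--         max_buffer += (4 * path_count - (2 * path_count + 1)) * max_splits(square_size - 1)
--         path_count = 2 * path_count + 1
--         square_size -= 1
--
--     if min_splits <= k <= min_splits + max_buffer:
--         return "YES", square_size
--
--     else:
--         return "NO", None
-- ===== SOURCE B (Python) =====
-- def solve_single_case(n, k):
--     if n > 75:
--         return "YES", n - 1
--     s0 = n - 1
--     # count how many loop steps A would take: after i steps
--     # min_splits + path_count = 8*2**i - 4 - i, and square_size = s0 - i must stay > 0
--     i = 0
--     while 8 * 2 ** i - 4 - i <= k and i < s0:
--         i += 1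
--     min_splits = 4 * 2 ** i - 3 - i
--     square_size = s0 - i
--     # max_splits(x) has closed form (4**x - 1) // 3; the accumulated buffer has closed form too
--     max_buffer = (4 ** s0 - 1) // 3 + (3 * 4 ** s0 - 4 * 2 ** (2 * s0 - i) + 4 ** (s0 - i) - 8 * 2 ** i + 8 + 3 * i) // 3
--     if min_splits <= k <= min_splits + max_buffer:
--         return "YES", square_size
--     return "NO", None
-- ===== Notes on version B (the rewrite author's own statement) =====
-- stated objective: alternative
-- what changed: Replaced the global memo dict, the recursive max_splits helper and the four-variable stateful while loop by closed forms: a bare loop only counts the number of iterations i, after which min_splits, square_size and max_buffer are computed directly from power formulas (max_splits(x) = (4**x-1)//3 and a closed-form geometric sum for the buffer).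
import Mathlib
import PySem

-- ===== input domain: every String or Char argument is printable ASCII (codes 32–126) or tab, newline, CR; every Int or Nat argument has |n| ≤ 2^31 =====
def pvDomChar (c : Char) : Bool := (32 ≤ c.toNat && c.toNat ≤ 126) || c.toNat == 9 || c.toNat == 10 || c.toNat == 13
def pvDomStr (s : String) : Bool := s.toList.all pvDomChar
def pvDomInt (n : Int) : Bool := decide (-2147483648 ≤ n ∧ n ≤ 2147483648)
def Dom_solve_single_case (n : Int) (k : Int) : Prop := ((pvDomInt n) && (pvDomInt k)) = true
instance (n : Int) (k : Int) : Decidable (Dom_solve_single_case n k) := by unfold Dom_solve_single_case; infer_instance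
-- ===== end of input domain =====

-- B replaces A's memoized recursion and stateful accumulation by closed-form formulas
-- (alternative decomposition; return value only — A also mutates the global memo dict).

-- ===== PORT A =====
-- A's global memo only caches values of this recurrence; it never changes them,
-- so the port is the plain recurrence (value-identical, step for step).
def msA : Nat → Int
  | 0 => 0
  | 1 => 1
  | (m+2) => 4 * msA (m+1) + 1

-- A's while loop; square_size (> 0 in the guard, decremented each pass) is the structural fuel.
-- State (min_splits, path_count, max_buffer); returns (min_splits, max_buffer, square_size).
def loopA (k : Int) (ms pc mb : Int) : Nat → Int × Int × Nat
  | 0 => (ms, mb, 0)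
  | (s+1) =>
      if ms + pc ≤ k then
        loopA k (ms + pc) (2 * pc + 1) (mb + (4 * pc - (2 * pc + 1)) * msA s) s
      else (ms, mb, s + 1)

def solve_single_case (n : Int) (k : Int) : String × Option Int :=
  if n > 75 then ("YES", some (n - 1))
  else
    -- under Pre_ we have n ≥ 1, so n-1 ≥ 0 and .toNat is exact (Python diverges for n ≤ 0)
    let sq := (n - 1).toNat
    match loopA k 1 3 (msA sq) sq with
    | (ms, mb, sq') =>
        if ms ≤ k ∧ k ≤ ms + mb then ("YES", some (sq' : Int)) else ("NO", none)

-- ===== PORT B =====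
-- Source B's counting loop: fuel is s0 - i, encoding the python guard 'i < s0'.
def countB (k : Int) (i : Nat) : Nat → Nat
  | 0 => i
  | (f+1) => if 8 * 2 ^ i - 4 - (i : Int) ≤ k then countB k (i + 1) f else i

def solve_single_case_alt (n : Int) (k : Int) : String × Option Int :=
  if n > 75 then ("YES", some (n - 1))
  else
    let s0 := n - 1
    let i := countB k 0 s0.toNat
    let minSplits : Int := 4 * 2 ^ i - 3 - (i : Int)
    let squareSize : Int := s0 - (i : Int)
    -- Python ** has nonnegative integer exponents here (inside Pre_), so .toNat is exact
    let maxBuffer : Int :=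
      PySem.Int.floordiv (4 ^ s0.toNat - 1) 3 +
      PySem.Int.floordiv
        (3 * 4 ^ s0.toNat - 4 * 2 ^ (2 * s0 - (i : Int)).toNat +
          4 ^ (s0 - (i : Int)).toNat - 8 * 2 ^ i + 8 + 3 * (i : Int)) 3
    if minSplits ≤ k ∧ k ≤ minSplits + maxBuffer then ("YES", some squareSize)
    else ("NO", none)

-- ===== PRECONDITION & SPEC =====
-- For n ≤ 0 (and only then) A calls max_splits on a negative argument, which recurses
-- past every base case: RecursionError. Pre_ excludes exactly those inputs.
def Pre_solve_single_case (n : Int) (k : Int) : Prop := 1 ≤ n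
instance (n : Int) (k : Int) : Decidable (Pre_solve_single_case n k) := by
  unfold Pre_solve_single_case; infer_instance
def pvWitness_solve_single_case : Int × Int := (4, 7)

def Spec_solve_single_case (n : Int) (k : Int) (out : String × Option Int) : Prop := out = solve_single_case_alt n k
instance (n : Int) (k : Int) (out : String × Option Int) : Decidable (Spec_solve_single_case n k out) := by unfold Spec_solve_single_case; infer_instance

-- ===== CLAIM (what is proved, stated in full; the proofs are below) =====
def Claim_equal_solve_single_case : Prop := ∀ (n : Int) (k : Int), Dom_solve_single_case n k → Pre_solve_single_case n k → Spec_solve_single_case n k (solve_single_case n k)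

-- ===== LEMMAS AND PROOFS =====

-- closed forms of A's loop state after i iterations
def pvM (i : Nat) : Int := 4 * 2 ^ i - 3 - (i : Int)       -- min_splits
def pvP (i : Nat) : Int := 4 * 2 ^ i - 1                   -- path_count
def pvMB (s0 : Nat) : Nat → Int                            -- max_buffer
  | 0 => msA s0
  | (j+1) => pvMB s0 j + (4 * pvP j - (2 * pvP j + 1)) * msA (s0 - j - 1)

theorem msA_closed : ∀ s : Nat, 3 * msA s + 1 = 4 ^ s
  | 0 => by simp [msA]
  | 1 => by simp [msA]
  | (s+2) => by
      have ih := msA_closed (s + 1)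
      simp only [msA]
      rw [pow_succ]
      linarith

theorem countB_le (k : Int) : ∀ (f i : Nat), countB k i f ≤ i + f := by
  intro f
  induction f with
  | zero => intro i; simp [countB]
  | succ f ih =>
      intro i
      simp only [countB]
      split
      · have := ih (i + 1); omega
      · omega

theorem loop_eq (k : Int) : ∀ (f i : Nat),
    loopA k (pvM i) (pvP i) (pvMB (i + f) i) f =
      (pvM (countB k i f), pvMB (i + f) (countB k i f), (i + f) - countB k i f) := by
  intro f
  induction f with
  | zero => intro i; simp [loopA, countB]
  | succ f ih =>
      intro i
      have hc : pvM i + pvP i = 8 * 2 ^ i - 4 - (i : Int) := by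
        simp [pvM, pvP]; ring
      have hs : i + (f + 1) = (i + 1) + f := by omega
      simp only [loopA, countB, hc, hs]
      split
      · have h1 : 8 * 2 ^ i - 4 - (i : Int) = pvM (i + 1) := by
          simp [pvM, pow_succ]; push_cast; ring
        have h2 : 2 * pvP i + 1 = pvP (i + 1) := by
          simp [pvP, pow_succ]; ring
        have h3 : pvMB ((i + 1) + f) i + (4 * pvP i - (2 * pvP i + 1)) * msA f
            = pvMB ((i + 1) + f) (i + 1) := by
          simp [pvMB, show (i + 1) + f - i - 1 = f by omega]
        rw [h1, h3, h2, ih (i + 1)]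
      · simp [show ((i + 1) + f) - i = f + 1 by omega]

theorem mb_closed : ∀ (s0 j : Nat), j ≤ s0 →
    3 * (pvMB s0 j - msA s0) =
      3 * 4 ^ s0 - 4 * 2 ^ (2 * s0 - j) + 4 ^ (s0 - j) - 8 * 2 ^ j + 8 + 3 * (j : Int) := by
  intro s0 j
  induction j with
  | zero =>
      intro _
      have h1 : (2 : Int) ^ (2 * s0) = 4 ^ s0 := by rw [pow_mul]; norm_num
      simp [pvMB, h1]; ring
  | succ j ih =>
      intro hj
      have ih := ih (by omega)
      set x : Int := 2 ^ j with hx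
      set y : Int := 2 ^ (s0 - j - 1) with hy
      have hms : 3 * msA (s0 - j - 1) = y ^ 2 - 1 := by
        have := msA_closed (s0 - j - 1)
        have h4 : (4 : Int) ^ (s0 - j - 1) = y ^ 2 := by
          rw [hy, ← pow_mul, show (s0 - j - 1) * 2 = 2 * (s0 - j - 1) by ring,
            pow_mul]; norm_num
        linarith [this, h4.symm]
      have e1 : (2 : Int) ^ (2 * s0 - j) = 4 * x * y ^ 2 := by
        rw [hx, hy, ← pow_mul, show (s0 - j - 1) * 2 = 2 * s0 - j - (j + 2) by omega]
        rw [show (4 : Int) = 2 ^ 2 by norm_num, mul_comm ((2:Int)^2) (2^j), ← pow_add, ← pow_add]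
        congr 1; omega
      have e2 : (2 : Int) ^ (2 * s0 - (j + 1)) = 2 * x * y ^ 2 := by
        rw [hx, hy, ← pow_mul, show (s0 - j - 1) * 2 = 2 * s0 - (j + 1) - (j + 1) by omega]
        rw [show (2 : Int) * 2 ^ j = 2 ^ (j + 1) by rw [pow_succ]; ring, ← pow_add]
        congr 1; omega
      have e3 : (4 : Int) ^ (s0 - j) = 4 * y ^ 2 := by
        rw [hy, ← pow_mul, show (s0 - j - 1) * 2 = 2 * (s0 - j) - 2 by omega,
          show (4 : Int) = 2 ^ 2 by norm_num, ← pow_mul, ← pow_add]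
        congr 1; omega
      have e4 : (4 : Int) ^ (s0 - (j + 1)) = y ^ 2 := by
        rw [hy, ← pow_mul, show (s0 - j - 1) * 2 = 2 * (s0 - (j + 1)) by omega, pow_mul]
        norm_num
      have e5 : (2 : Int) ^ (j + 1) = 2 * x := by rw [hx, pow_succ]; ring
      have hstep : 3 * (pvMB s0 (j + 1) - pvMB s0 j) = (8 * x - 3) * (y ^ 2 - 1) := by
        have : 4 * pvP j - (2 * pvP j + 1) = 8 * x - 3 := by
          simp [pvP, hx]; ring
        simp only [pvMB, this]
        rw [show pvMB s0 j + (8 * x - 3) * msA (s0 - j - 1) - pvMB s0 j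
            = (8 * x - 3) * msA (s0 - j - 1) by ring]
        rw [show (3 : Int) * ((8 * x - 3) * msA (s0 - j - 1))
            = (8 * x - 3) * (3 * msA (s0 - j - 1)) by ring, hms]
      rw [e2, e4, e5]
      rw [e1, e3] at ih
      push_cast
      nlinarith [hstep, ih]

theorem fd3 (m : Int) : PySem.Int.floordiv (3 * m) 3 = m := by
  rw [PySem.Int.floordiv_eq_ediv_of_pos (by norm_num)]
  exact Int.mul_ediv_cancel_left m (by norm_num)

-- ===== VERDICT (by name: the statement is the Claim_ definition above) =====
theorem solve_single_case_spec : Claim_equal_solve_single_case := by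
  intro n k _ hpre
  unfold Spec_solve_single_case solve_single_case solve_single_case_alt
  by_cases h75 : n > 75
  · simp [h75]
  · simp only [h75, if_false]
    have hn1 : (0 : Int) ≤ n - 1 := by
      unfold Pre_solve_single_case at hpre; omega
    set S : Nat := (n - 1).toNat with hS
    have hSn : ((S : Int)) = n - 1 := Int.toNat_of_nonneg hn1
    set j : Nat := countB k 0 S with hj
    have hjS : j ≤ S := by have := countB_le k S 0; omega
    have hloop := loop_eq k S 0
    simp only [Nat.zero_add] at hloop
    have hM0 : pvM 0 = 1 := by simp [pvM]
    have hP0 : pvP 0 = 3 := by simp [pvP]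
    have hMB0 : pvMB S 0 = msA S := rfl
    rw [hM0, hP0, hMB0] at hloop
    rw [← hj] at hloop
    rw [hloop]
    -- B side: compute maxBuffer = pvMB S j
    have ht1 : (2 * (n - 1) - (j : Int)).toNat = 2 * S - j := by omega
    have ht2 : ((n - 1) - (j : Int)).toNat = S - j := by omega
    have hfd1 : PySem.Int.floordiv (4 ^ S - 1) 3 = msA S := by
      rw [show (4 : Int) ^ S - 1 = 3 * msA S by have := msA_closed S; linarith]
      exact fd3 _
    have hfd2 : PySem.Int.floordiv
        (3 * 4 ^ S - 4 * 2 ^ (2 * S - j) + 4 ^ (S - j) - 8 * 2 ^ j + 8 + 3 * (j : Int)) 3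
        = pvMB S j - msA S := by
      rw [← mb_closed S j hjS]
      exact fd3 _
    rw [ht1, ht2, hfd1, hfd2]
    have hbuf : msA S + (pvMB S j - msA S) = pvMB S j := by ring
    rw [hbuf]
    have hsq : ((S - j : Nat) : Int) = (n - 1) - (j : Int) := by omega
    simp only [pvM, hsq]
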